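-- pv_equiv track=rewrite | github.com/MrBrantCode/unitest_baseline | mut_generate/mist_train_cf/cf_81386/solution.py | find_longest_string_sum
-- ===== SOURCE A (Python) =====
-- from typing import List, Tuple
-- import string
--
-- def find_longest_string_sum(strings: List[str], prefix_suffix: Tuple[str, str]) -> Tuple[str, int]:
--     longest_string = ""
--     total_sum = 0
--
--     # maps a-z to 1-26, useful for sum computation
--     ch_to_int = {ch: idx for idx, ch in enumerate(string.ascii_lowercase, start=1)}
--
--     for s in strings:
--         if (s.lower().startswith(prefix_suffix[0].lower())
--             and s.lower().endswith(prefix_suffix[1].lower())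
--                 and len(s) >= len(longest_string)):
--
--             # record the longest string and compute sum of its characters
--             longest_string = s
--             total_sum = sum(ch_to_int[ch] for ch in s.lower() if ch in ch_to_int)
--
--     return longest_string, total_sum
-- ===== SOURCE B (Python) =====
-- def find_longest_string_sum(strings, prefix_suffix):
--     p = prefix_suffix[0].lower()
--     q = prefix_suffix[1].lower()
--     matches = [s for s in strings if s.lower().startswith(p) and s.lower().endswith(q)]
--     longest = ""
--     if matches:
--         # Python's max keeps the first maximal element, so on the reversed
--         # list the LAST longest match wins, matching the >= update rule.
--         longest = max(reversed(matches), key=len)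
--     total = sum(ord(c) - 96 for c in longest.lower() if 97 <= ord(c) <= 122)
--     return longest, total
-- ===== Notes on version B (the rewrite author's own statement) =====
-- stated objective: faster
-- what changed: Replaces the single accumulating loop (which recomputes the dictionary-based character sum at every new best match) by filter -> max(reversed, key=len) -> one arithmetic character sum of the single winner, with no lookup table.
import Mathlib
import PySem

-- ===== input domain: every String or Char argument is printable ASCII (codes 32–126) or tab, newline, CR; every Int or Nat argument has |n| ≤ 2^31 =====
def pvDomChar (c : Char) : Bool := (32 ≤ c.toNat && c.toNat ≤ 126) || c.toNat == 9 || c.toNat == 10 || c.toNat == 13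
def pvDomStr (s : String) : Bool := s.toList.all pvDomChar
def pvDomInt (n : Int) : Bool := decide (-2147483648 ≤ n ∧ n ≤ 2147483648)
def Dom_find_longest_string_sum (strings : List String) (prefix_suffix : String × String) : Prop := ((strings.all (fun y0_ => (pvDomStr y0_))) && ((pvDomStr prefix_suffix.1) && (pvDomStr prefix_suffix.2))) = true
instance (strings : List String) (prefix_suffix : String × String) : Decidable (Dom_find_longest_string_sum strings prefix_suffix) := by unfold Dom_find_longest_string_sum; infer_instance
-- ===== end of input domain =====

-- B replaces A's single accumulating loop (which rebuilds the character sum from a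
-- lookup table at every update) by filter -> last-longest-wins max -> one arithmetic
-- character sum of the single winner (A recomputes the sum at every update); objective: faster.

-- ===== PORT A =====
-- {ch: idx for idx, ch in enumerate(string.ascii_lowercase, start=1)}
def pvChToInt : PySem.Dict Char Int :=
  (PySem.List.enumerate ("abcdefghijklmnopqrstuvwxyz".toList) 1).foldl
    (fun d p => d.insert p.2 p.1) PySem.Dict.empty

-- sum(ch_to_int[ch] for ch in s.lower() if ch in ch_to_int)
def pvSumA (s : String) : Int :=
  (PySem.Str.lower s).toList.foldl
    (fun acc ch =>
      match pvChToInt.get? ch with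
      | some v => acc + v
      | none => acc) 0

def find_longest_string_sum (strings : List String) (prefix_suffix : String × String) : String × Int :=
  strings.foldl
    (fun st s =>
      if PySem.Str.startswith (PySem.Str.lower s) (PySem.Str.lower prefix_suffix.1)
          && PySem.Str.endswith (PySem.Str.lower s) (PySem.Str.lower prefix_suffix.2)
          && decide (st.1.length ≤ s.length)
      then (s, pvSumA s)
      else st)
    ("", 0)

-- ===== PORT B =====
-- sum(ord(c) - 96 for c in longest.lower() if 97 <= ord(c) <= 122)
def pvSumB (s : String) : Int :=
  (PySem.Str.lower s).toList.foldl
    (fun acc c =>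
      if 97 ≤ c.toNat && c.toNat ≤ 122 then acc + ((c.toNat : Int) - 96) else acc) 0

def find_longest_string_sum_alt (strings : List String) (prefix_suffix : String × String) : String × Int :=
  let p := PySem.Str.lower prefix_suffix.1
  let q := PySem.Str.lower prefix_suffix.2
  let msList := strings.filter
    (fun s => PySem.Str.startswith (PySem.Str.lower s) p && PySem.Str.endswith (PySem.Str.lower s) q)
  let longest :=
    match msList.reverse with
    | [] => ""
    | h :: t => t.foldl (fun m s => if m.length < s.length then s else m) h
  (longest, pvSumB longest)

-- ===== PRECONDITION & SPEC =====
def Spec_find_longest_string_sum (strings : List String) (prefix_suffix : String × String) (out : String × Int) : Prop := out = find_longest_string_sum_alt strings prefix_suffix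
instance (strings : List String) (prefix_suffix : String × String) (out : String × Int) : Decidable (Spec_find_longest_string_sum strings prefix_suffix out) := by unfold Spec_find_longest_string_sum; infer_instance

-- ===== CLAIM (what is proved, stated in full; the proofs are below) =====
def Claim_equal_find_longest_string_sum : Prop := ∀ (strings : List String) (prefix_suffix : String × String), Dom_find_longest_string_sum strings prefix_suffix → Spec_find_longest_string_sum strings prefix_suffix (find_longest_string_sum strings prefix_suffix)

-- ===== LEMMAS AND PROOFS =====

-- A's prefix/suffix test, named for the proofs
def pvPred (ps : String × String) (s : String) : Bool :=
  PySem.Str.startswith (PySem.Str.lower s) (PySem.Str.lower ps.1)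
    && PySem.Str.endswith (PySem.Str.lower s) (PySem.Str.lower ps.2)

-- A's running best (new wins ties), B's first-max fold, and the head-seeded fold
def pvBestRev (L : String) (l : List String) : String :=
  l.foldl (fun m s => if m.length ≤ s.length then s else m) L

def pvFmax (x : String) (t : List String) : String :=
  t.foldl (fun m s => if m.length < s.length then s else m) x

def pvHeadFold : List String → String
  | [] => ""
  | h :: t => pvFmax h t

-- the A-side lookup table, spelled out
theorem pvChToInt_eq : pvChToInt = PySem.Dict.mk
    [('a',1),('b',2),('c',3),('d',4),('e',5),('f',6),('g',7),('h',8),('i',9),('j',10),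
     ('k',11),('l',12),('m',13),('n',14),('o',15),('p',16),('q',17),('r',18),('s',19),
     ('t',20),('u',21),('v',22),('w',23),('x',24),('y',25),('z',26)] := by decide

theorem get_pvChToInt (c : Char) :
    pvChToInt.get? c = if 97 ≤ c.toNat && c.toNat ≤ 122 then some ((c.toNat : Int) - 96) else none := by
  rw [pvChToInt_eq]
  simp only [PySem.Dict.get?_mk_cons]
  by_cases hr : 97 ≤ c.toNat ∧ c.toNat ≤ 122
  · have hd : c.toNat = 97 ∨ c.toNat = 98 ∨ c.toNat = 99 ∨ c.toNat = 100 ∨ c.toNat = 101 ∨ c.toNat = 102 ∨ c.toNat = 103 ∨ c.toNat = 104 ∨ c.toNat = 105 ∨ c.toNat = 106 ∨ c.toNat = 107 ∨ c.toNat = 108 ∨ c.toNat = 109 ∨ c.toNat = 110 ∨ c.toNat = 111 ∨ c.toNat = 112 ∨ c.toNat = 113 ∨ c.toNat = 114 ∨ c.toNat = 115 ∨ c.toNat = 116 ∨ c.toNat = 117 ∨ c.toNat = 118 ∨ c.toNat = 119 ∨ c.toNat = 120 ∨ c.toNat = 121 ∨ c.toNat = 122 := by omega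
    rcases hd with h|h|h|h|h|h|h|h|h|h|h|h|h|h|h|h|h|h|h|h|h|h|h|h|h|h <;> rw [← Char.ofNat_toNat c, h] <;> decide
  · have hne : ∀ d : Char, 97 ≤ d.toNat → d.toNat ≤ 122 → (d == c) = false := by
      intro d h1 h2
      simp only [beq_eq_false_iff_ne]
      rintro rfl
      exact hr ⟨h1, h2⟩
    simp only [hne 'a' (by decide) (by decide), hne 'b' (by decide) (by decide), hne 'c' (by decide) (by decide), hne 'd' (by decide) (by decide), hne 'e' (by decide) (by decide), hne 'f' (by decide) (by decide), hne 'g' (by decide) (by decide), hne 'h' (by decide) (by decide), hne 'i' (by decide) (by decide), hne 'j' (by decide) (by decide), hne 'k' (by decide) (by decide), hne 'l' (by decide) (by decide), hne 'm' (by decide) (by decide), hne 'n' (by decide) (by decide), hne 'o' (by decide) (by decide), hne 'p' (by decide) (by decide), hne 'q' (by decide) (by decide), hne 'r' (by decide) (by decide), hne 's' (by decide) (by decide), hne 't' (by decide) (by decide), hne 'u' (by decide) (by decide), hne 'v' (by decide) (by decide), hne 'w' (by decide) (by decide), hne 'x' (by decide) (by decide), hne 'y' (by decide) (by decide), hne 'z'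 (by decide) (by decide), Bool.false_eq_true, if_false]
    rw [if_neg (by simpa using hr)]
    simp [PySem.Dict.get?]

theorem sum_fold_eq (cs : List Char) (a : Int) :
    cs.foldl (fun acc ch => match pvChToInt.get? ch with | some v => acc + v | none => acc) a
      = cs.foldl (fun acc c => if 97 ≤ c.toNat && c.toNat ≤ 122 then acc + ((c.toNat : Int) - 96) else acc) a := by
  have hstep : ∀ (x : Int) (c : Char),
      (match pvChToInt.get? c with | some v => x + v | none => x)
        = if 97 ≤ c.toNat && c.toNat ≤ 122 then x + ((c.toNat : Int) - 96) else x := by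
    intro x c
    rw [get_pvChToInt]
    by_cases h : (97 ≤ c.toNat && c.toNat ≤ 122) = true
    · rw [if_pos h, if_pos h]
    · rw [if_neg h, if_neg h]
  simp only [hstep]

theorem sumA_eq_sumB (s : String) : pvSumA s = pvSumB s := sum_fold_eq _ _

-- A's pair-state loop carries total = pvSumA(longest)
theorem pair_fold (ps : String × String) (l : List String) (L : String) :
    l.foldl
      (fun st s =>
        if PySem.Str.startswith (PySem.Str.lower s) (PySem.Str.lower ps.1)
            && PySem.Str.endswith (PySem.Str.lower s) (PySem.Str.lower ps.2)
            && decide (st.1.length ≤ s.length)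
        then (s, pvSumA s) else st) (L, pvSumA L)
      = (let M := l.foldl (fun L s => if pvPred ps s && decide (L.length ≤ s.length) then s else L) L
         (M, pvSumA M)) := by
  induction l generalizing L with
  | nil => rfl
  | cons s t ih =>
    simp only [List.foldl_cons, pvPred]
    by_cases h : (PySem.Str.startswith (PySem.Str.lower s) (PySem.Str.lower ps.1)
        && PySem.Str.endswith (PySem.Str.lower s) (PySem.Str.lower ps.2)
        && decide (L.length ≤ s.length)) = true
    · rw [if_pos h, if_pos (by simpa [pvPred] using h)]
      exact ih s
    · rw [if_neg h, if_neg (by simpa [pvPred] using h)]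
      exact ih L

-- the guard's filter half splits off
theorem fold_filter (ps : String × String) (l : List String) (L : String) :
    l.foldl (fun L s => if pvPred ps s && decide (L.length ≤ s.length) then s else L) L
      = pvBestRev L (l.filter (pvPred ps)) := by
  induction l generalizing L with
  | nil => rfl
  | cons s t ih =>
    by_cases hp : pvPred ps s = true
    · simp only [List.foldl_cons, List.filter_cons_of_pos hp, hp, Bool.true_and, pvBestRev,
        List.foldl_cons]
      by_cases hl : L.length ≤ s.length
      · rw [if_pos (by simpa using hl), if_pos hl]; exact ih s
      · rw [if_neg (by simpa using hl), if_neg hl]; exact ih L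
    · simp only [List.foldl_cons, List.filter_cons_of_neg hp,
        (by simp [hp] : (pvPred ps s && decide (L.length ≤ s.length)) = false), Bool.false_eq_true,
        if_false]
      exact ih L

-- pushing a ≥-step through the first-max fold of the reversal
theorem fmax_push (r : List String) (x L s : String) :
    pvFmax x (r ++ [if L.length ≤ s.length then s else L]) = pvFmax x (r ++ [s, L]) := by
  induction r generalizing x with
  | nil =>
    simp only [pvFmax, List.nil_append, List.foldl_cons, List.foldl_nil]
    split_ifs <;> first | rfl | (exfalso; omega)
  | cons h r ih =>
    simp only [pvFmax, List.cons_append, List.foldl_cons] at ih ⊢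
    exact ih _

theorem bestRev_eq_headFold (l : List String) (L : String) :
    pvBestRev L l = pvHeadFold (l.reverse ++ [L]) := by
  induction l generalizing L with
  | nil => rfl
  | cons s t ih =>
    have lhs : pvBestRev L (s :: t) = pvBestRev (if L.length ≤ s.length then s else L) t := rfl
    rw [lhs, ih]
    have : (s :: t).reverse ++ [L] = t.reverse ++ [s, L] := by simp
    rw [this]
    cases t.reverse with
    | nil =>
      simp only [List.nil_append, pvHeadFold, pvFmax, List.foldl_cons, List.foldl_nil]
      split_ifs <;> first | rfl | (exfalso; omega)
    | cons h r =>
      simp only [List.cons_append, pvHeadFold]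
      exact fmax_push r h L s

-- a trailing "" never wins
theorem headFold_append_empty (r : List String) :
    pvHeadFold (r ++ [""]) = pvHeadFold r := by
  cases r with
  | nil => rfl
  | cons h t =>
    simp only [List.cons_append, pvHeadFold, pvFmax, List.foldl_append, List.foldl_cons,
      List.foldl_nil]
    rw [if_neg (by simp)]

-- ===== VERDICT (by name: the statement is the Claim_ definition above) =====
theorem find_longest_string_sum_spec : Claim_equal_find_longest_string_sum := by
  intro strings ps _
  unfold Spec_find_longest_string_sum find_longest_string_sum find_longest_string_sum_alt
  have h0 : (("" : String), (0 : Int)) = (("" : String), pvSumA "") := rfl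
  rw [h0, pair_fold ps strings "", fold_filter ps strings "", bestRev_eq_headFold (strings.filter (pvPred ps)) "",
    headFold_append_empty]
  simp only [pvPred]
  rw [show (List.filter
      (fun s => PySem.Str.startswith (PySem.Str.lower s) (PySem.Str.lower ps.1)
        && PySem.Str.endswith (PySem.Str.lower s) (PySem.Str.lower ps.2)) strings)
      = List.filter (pvPred ps) strings from rfl]
  cases (List.filter (pvPred ps) strings).reverse with
  | nil => rfl
  | cons h t =>
    simp only [pvHeadFold, pvFmax]
    exact congrArg (Prod.mk _) (sumA_eq_sumB _)
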